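-- pv_equiv track=rewrite | github.com/suroy92/automated-documentation-generator | src/technical_doc_generator.py | _generate_project_tree
-- ===== SOURCE A (Python) =====
-- from typing import Any, Dict, List, Optional, Tuple
--
-- def _generate_project_tree(files: List[Dict[str, Any]], project_name: str) -> str:
--     """Generate ASCII tree representation of project structure."""
--     # Build directory tree
--     tree: Dict[str, Any] = {"files": [], "dirs": {}}
--
--     for f in files:
--         display_path = f.get("display_path", "")
--         if not display_path:
--             continue
--
--         parts = display_path.split("/")
--         if len(parts) == 1:
--             # Root level file
--             tree["files"].append(parts[0])
--         else:
--             # File in subdirectory - navigate through dirs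
--             current = tree["dirs"]
--             for i, part in enumerate(parts[:-1]):
--                 if part not in current:
--                     current[part] = {"files": [], "dirs": {}}
--                 if i < len(parts) - 2:
--                     current = current[part]["dirs"]
--             # Add file to the last directory
--             current[parts[-2]]["files"].append(parts[-1])
--
--     # Generate ASCII tree
--     lines = [project_name + "/"]
--
--     def add_tree_lines(dirs: Dict, files: List[str], prefix: str = ""):
--         all_dirs = sorted(dirs.keys())
--         all_files = sorted(files)
--
--         # Add directories first
--         for i, dir_name in enumerate(all_dirs):
--             is_last = (i == len(all_dirs) - 1) and not all_files
--             connector = "└── " if is_last else "├── "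
--             lines.append(f"{prefix}{connector}{dir_name}/")
--
--             extension = "    " if is_last else "│   "
--             dir_node = dirs[dir_name]
--             add_tree_lines(dir_node.get("dirs", {}), dir_node.get("files", []), prefix + extension)
--
--         # Add files
--         for i, fname in enumerate(all_files):
--             is_last = i == len(all_files) - 1
--             connector = "└── " if is_last else "├── "
--             lines.append(f"{prefix}{connector}{fname}")
--
--     add_tree_lines(tree.get("dirs", {}), tree.get("files", []))
--     return "\n".join(lines)
-- ===== SOURCE B (Python) =====
-- from typing import Any, Dict, List
--
--
-- def _generate_project_tree(files: List[Dict[str, Any]], project_name: str) -> str: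
--     """Generate ASCII tree representation of project structure."""
--     # Build the tree with a uniform setdefault descent (root handled like any node).
--     tree: Dict[str, Any] = {"files": [], "dirs": {}}
--     for f in files:
--         display_path = f.get("display_path", "")
--         if not display_path:
--             continue
--         parts = display_path.split("/")
--         node = tree
--         for part in parts[:-1]:
--             node = node["dirs"].setdefault(part, {"files": [], "dirs": {}})
--         node["files"].append(parts[-1])
--
--     # Render with an explicit-stack iterative pre-order walk instead of recursion.
--     lines = [project_name + "/"]
--     stack: list = [(tree, "")]
--     while stack:
--         item = stack.pop()
--         if isinstance(item, str):
--             lines.append(item)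
--             continue
--         node, prefix = item
--         dir_items = sorted(node["dirs"].items(), key=lambda kv: kv[0])
--         file_names = sorted(node["files"])
--         tasks: list = []
--         for i, (name, child) in enumerate(dir_items):
--             is_last = i == len(dir_items) - 1 and not file_names
--             tasks.append(prefix + ("└── " if is_last else "├── ") + name + "/")
--             tasks.append((child, prefix + ("    " if is_last else "│   ")))
--         for i, fname in enumerate(file_names):
--             is_last = i == len(file_names) - 1
--             tasks.append(prefix + ("└── " if is_last else "├── ") + fname)
--         stack.extend(reversed(tasks))
--     return "\n".join(lines)
-- ===== Notes on version B (the rewrite author's own statement) =====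
-- stated objective: alternative
-- what changed: The tree is built with a uniform setdefault descent (the root handled like any directory node, no special root-file case) and the recursive line renderer is replaced by an explicit-stack iterative pre-order walk over line/node tasks.
import Mathlib
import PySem

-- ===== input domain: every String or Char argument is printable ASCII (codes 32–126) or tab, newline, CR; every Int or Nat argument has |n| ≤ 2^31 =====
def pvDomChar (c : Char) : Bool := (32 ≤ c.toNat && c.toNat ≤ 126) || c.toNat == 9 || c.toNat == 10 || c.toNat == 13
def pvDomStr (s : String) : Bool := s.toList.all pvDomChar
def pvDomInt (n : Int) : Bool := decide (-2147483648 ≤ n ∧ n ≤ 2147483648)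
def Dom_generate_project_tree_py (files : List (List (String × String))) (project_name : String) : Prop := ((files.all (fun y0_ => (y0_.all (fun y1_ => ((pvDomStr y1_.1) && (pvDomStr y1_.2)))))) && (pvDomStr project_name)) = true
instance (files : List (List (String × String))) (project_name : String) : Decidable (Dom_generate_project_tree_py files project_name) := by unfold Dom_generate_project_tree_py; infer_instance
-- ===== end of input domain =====

-- B replaces A's recursive renderer by an explicit-stack iterative pre-order walk and builds the
-- tree with a uniform setdefault descent (objective: alternative decomposition, same cost).

-- ===== PORT A =====
-- Shared data model of the Python nested dicts {"files": [...], "dirs": {...}}: a node is a pair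
-- (files, dirs); the dirs dict is the insertion-ordered association structure PvDirs, entries
-- carrying the child node's two components inline (avoids a nested inductive).
inductive PvDirs where
  | nil : PvDirs
  | cons : String → List String → PvDirs → PvDirs → PvDirs  -- name, child files, child dirs, rest
deriving DecidableEq, Repr

def pvDsize : PvDirs → Nat
  | .nil => 1
  | .cons _ cf cd r => 2 + cf.length + pvDsize cd + pvDsize r

-- dirs.items() in insertion order
def pvToPairs : PvDirs → List (String × (List String × PvDirs))
  | .nil => []
  | .cons n cf cd r => (n, (cf, cd)) :: pvToPairs r

-- `part in current` (dict key membership)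
def pvHas : PvDirs → String → Bool
  | .nil, _ => false
  | .cons n _ _ r, k => n == k || pvHas r k

-- `current[part] = {"files": [], "dirs": {}}`: a new key appends at the end
def pvAppendNew : PvDirs → String → PvDirs
  | .nil, k => .cons k [] .nil .nil
  | .cons n cf cd r, k => .cons n cf cd (pvAppendNew r k)

-- `if part not in current: current[part] = empty`  (also dict.setdefault in B)
def pvEnsure (d : PvDirs) (k : String) : PvDirs :=
  if pvHas d k then d else pvAppendNew d k

-- in-place mutation of the node stored under an existing key
def pvModify : PvDirs → String → (List String × PvDirs → List String × PvDirs) → PvDirs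
  | .nil, _, _ => .nil
  | .cons n cf cd r, k, g =>
      if n == k then .cons n (g (cf, cd)).1 (g (cf, cd)).2 r
      else .cons n cf cd (pvModify r k g)

def pvItemsSize (items : List (String × (List String × PvDirs))) : Nat :=
  (items.map (fun p => 2 + p.2.1.length + pvDsize p.2.2)).sum

-- size bookkeeping used by the termination arguments of both renderers
lemma pvDsize_eq_itemsSize (d : PvDirs) : pvDsize d = 1 + pvItemsSize (pvToPairs d) := by
  induction d with
  | nil => simp [pvDsize, pvToPairs, pvItemsSize]
  | cons n cf cd r ih1 ih2 => simp [pvDsize, pvToPairs, pvItemsSize] at *; omega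

lemma pvItemsSize_sorted (items : List (String × (List String × PvDirs))) :
    pvItemsSize (PySem.List.sorted items (fun p => p.1) false) = pvItemsSize items := by
  unfold pvItemsSize
  exact List.Perm.sum_eq (List.Perm.map _ (PySem.List.sorted_perm items (fun p => p.1) false))

-- A's tree build: navigate `parts[:-1]` creating nodes, append the file name at the last directory
def pvInsertA : PvDirs → List String → String → PvDirs
  | d, [], _ => d
  | d, [p], fname => pvModify (pvEnsure d p) p (fun c => (c.1 ++ [fname], c.2))
  | d, p :: q :: r, fname =>
      pvModify (pvEnsure d p) p (fun c => (c.1, pvInsertA c.2 (q :: r) fname))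

-- one iteration of A's `for f in files` loop
def pvStepA (t : List String × PvDirs) (f : List (String × String)) : List String × PvDirs :=
  if (f.lookup "display_path").getD "" = "" then t
  else
    match PySem.Str.split? ((f.lookup "display_path").getD "") "/" with
    | none => t          -- unreachable: the separator "/" is nonempty
    | some [] => t       -- unreachable: str.split never returns an empty list
    | some [single] => (t.1 ++ [single], t.2)                       -- root level file
    | some (p :: q :: r) =>
        (t.1, pvInsertA t.2 ((p :: q :: r).dropLast) ((p :: q :: r).getLast (by simp)))

-- the `for i, fname in enumerate(all_files)` loop of add_tree_lines
def pvFileLinesA : List String → String → List String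
  | [], _ => []
  | [f], pfx => [pfx ++ "└── " ++ f]
  | f :: g :: r, pfx => (pfx ++ "├── " ++ f) :: pvFileLinesA (g :: r) pfx

-- A's recursive add_tree_lines (returning the appended lines); sorted(dirs.keys()) followed by
-- dirs[dir_name] is ported as the key-sorted items list (dict keys are unique).
mutual
def pvAddTreeA (fs : List String) (d : PvDirs) (pfx : String) : List String :=
  let sfs := PySem.List.sorted fs (fun s => s) false
  pvDirLoopA (PySem.List.sorted (pvToPairs d) (fun p => p.1) false) sfs pfx ++ pvFileLinesA sfs pfx
termination_by 1 + fs.length + pvDsize d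
decreasing_by
  have := pvDsize_eq_itemsSize d
  rw [pvItemsSize_sorted]; omega

def pvDirLoopA : List (String × (List String × PvDirs)) → List String → String → List String
  | [], _, _ => []
  | (n, c) :: rest, sfs, pfx =>
      let isLast := rest.isEmpty && sfs.isEmpty
      (pfx ++ (if isLast then "└── " else "├── ") ++ n ++ "/") ::
        (pvAddTreeA c.1 c.2 (pfx ++ (if isLast then "    " else "│   ")) ++ pvDirLoopA rest sfs pfx)
termination_by items _ _ => pvItemsSize items
decreasing_by
  all_goals (simp [pvItemsSize]; try omega)
end

def generate_project_tree_py (files : List (List (String × String))) (project_name : String) : String :=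
  PySem.Str.join "\n" ((project_name ++ "/") ::
    pvAddTreeA (files.foldl pvStepA ([], PvDirs.nil)).1 (files.foldl pvStepA ([], PvDirs.nil)).2 "")

-- ===== PORT B =====
-- B's build: uniform setdefault descent over parts[:-1] starting at the root node itself
def pvInsertB : (List String × PvDirs) → List String → String → (List String × PvDirs)
  | t, [], fname => (t.1 ++ [fname], t.2)
  | t, p :: rest, fname =>
      let d := pvEnsure t.2 p
      (t.1, pvModify d p (fun c => pvInsertB c rest fname))

def pvStepB (t : List String × PvDirs) (f : List (String × String)) : List String × PvDirs :=
  if (f.lookup "display_path").getD "" = "" then t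
  else
    match PySem.Str.split? ((f.lookup "display_path").getD "") "/" with
    | none => t          -- unreachable: the separator "/" is nonempty
    | some [] => t       -- unreachable: str.split never returns an empty list
    | some (p :: r) =>
        pvInsertB t ((p :: r).dropLast) ((p :: r).getLast (by simp))

-- B's renderer: a stack machine.  A task is either a finished line or a node to expand; the
-- Python pushes the per-node task list reversed onto a pop-from-the-end stack, which is exactly
-- a pop-from-the-head list in the order built here.
inductive PvTask where
  | line : String → PvTask
  | node : List String → PvDirs → String → PvTask
deriving DecidableEq, Repr

def pvTaskSize : PvTask → Nat
  | .line _ => 1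
  | .node fs d _ => 1 + fs.length + pvDsize d

def pvStackSize (st : List PvTask) : Nat := (st.map pvTaskSize).sum

-- the `for i, (name, child) in enumerate(dir_items)` loop building tasks
def pvDirTasksB : List (String × (List String × PvDirs)) → Bool → String → List PvTask
  | [], _, _ => []
  | (n, c) :: rest, noFiles, pfx =>
      let isLast := rest.isEmpty && noFiles
      .line (pfx ++ (if isLast then "└── " else "├── ") ++ n ++ "/") ::
      .node c.1 c.2 (pfx ++ (if isLast then "    " else "│   ")) ::
      pvDirTasksB rest noFiles pfx

-- the `for i, fname in enumerate(file_names)` loop building tasks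
def pvFileTasksB : List String → String → List PvTask
  | [], _ => []
  | [f], pfx => [.line (pfx ++ "└── " ++ f)]
  | f :: g :: r, pfx => .line (pfx ++ "├── " ++ f) :: pvFileTasksB (g :: r) pfx

-- the task list one popped node contributes
def pvExpandB (fs : List String) (d : PvDirs) (pfx : String) : List PvTask :=
  let sfs := PySem.List.sorted fs (fun s => s) false
  pvDirTasksB (PySem.List.sorted (pvToPairs d) (fun p => p.1) false) sfs.isEmpty pfx
    ++ pvFileTasksB sfs pfx

lemma pvStackSize_append (a b : List PvTask) :
    pvStackSize (a ++ b) = pvStackSize a + pvStackSize b := by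
  simp [pvStackSize]

lemma pvStackSize_dirTasks (items : List (String × (List String × PvDirs))) (nf : Bool) (pfx : String) :
    pvStackSize (pvDirTasksB items nf pfx) = pvItemsSize items := by
  induction items generalizing pfx with
  | nil => simp [pvDirTasksB, pvStackSize, pvItemsSize]
  | cons x rest ih =>
    obtain ⟨n, c⟩ := x
    have h := ih pfx
    simp only [pvDirTasksB, pvStackSize, pvItemsSize, pvTaskSize, List.map_cons,
      List.sum_cons] at h ⊢
    omega

lemma pvStackSize_fileTasks (l : List String) (pfx : String) :
    pvStackSize (pvFileTasksB l pfx) = l.length := by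
  induction l generalizing pfx with
  | nil => simp [pvFileTasksB, pvStackSize]
  | cons f t ih =>
    cases t with
    | nil => simp [pvFileTasksB, pvStackSize, pvTaskSize]
    | cons g r =>
      have h := ih pfx
      simp only [pvFileTasksB, pvStackSize, pvTaskSize, List.map_cons, List.sum_cons,
        List.length_cons] at h ⊢
      omega

lemma pvStackSize_expand (fs : List String) (d : PvDirs) (pfx : String) :
    pvStackSize (pvExpandB fs d pfx) < 1 + fs.length + pvDsize d := by
  unfold pvExpandB
  rw [pvStackSize_append, pvStackSize_dirTasks, pvStackSize_fileTasks,
      pvItemsSize_sorted, PySem.List.length_sorted]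
  have := pvDsize_eq_itemsSize d
  omega

-- the `while stack:` loop (lines are only appended, so the result is the emitted-line list)
def pvRunB : List PvTask → List String
  | [] => []
  | .line s :: rest => s :: pvRunB rest
  | .node fs d pfx :: rest => pvRunB (pvExpandB fs d pfx ++ rest)
termination_by st => pvStackSize st
decreasing_by
  · simp [pvStackSize, pvTaskSize]
  · rw [pvStackSize_append]
    have h1 := pvStackSize_expand fs d pfx
    have h2 : pvStackSize (PvTask.node fs d pfx :: rest) =
        (1 + fs.length + pvDsize d) + pvStackSize rest := by
      simp [pvStackSize, pvTaskSize]
    omega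

def generate_project_tree_py_alt (files : List (List (String × String))) (project_name : String) : String :=
  PySem.Str.join "\n" ((project_name ++ "/") ::
    pvRunB [PvTask.node (files.foldl pvStepB ([], PvDirs.nil)).1 (files.foldl pvStepB ([], PvDirs.nil)).2 ""])

-- ===== PRECONDITION & SPEC =====
def Spec_generate_project_tree_py (files : List (List (String × String))) (project_name : String) (out : String) : Prop := out = generate_project_tree_py_alt files project_name
instance (files : List (List (String × String))) (project_name : String) (out : String) : Decidable (Spec_generate_project_tree_py files project_name out) := by unfold Spec_generate_project_tree_py; infer_instance

-- ===== CLAIM (what is proved, stated in full; the proofs are below) =====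
def Claim_equal_generate_project_tree_py : Prop := ∀ (files : List (List (String × String))) (project_name : String), Dom_generate_project_tree_py files project_name → Spec_generate_project_tree_py files project_name (generate_project_tree_py files project_name)

-- ===== LEMMAS AND PROOFS =====

-- B's setdefault descent builds the same node as A's navigate-then-append, level by level
lemma pvInsertB_eq_insertA (path : List String) (c : List String × PvDirs) (fname : String)
    (h : path ≠ []) : pvInsertB c path fname = (c.1, pvInsertA c.2 path fname) := by
  induction path generalizing c with
  | nil => exact absurd rfl h
  | cons p rest ih =>
    cases rest with
    | nil => simp [pvInsertB, pvInsertA]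
    | cons q r =>
      simp only [pvInsertB, pvInsertA]
      congr 1
      congr 1
      funext c'
      exact ih c' (by simp)

lemma pvStepB_eq_stepA : pvStepB = pvStepA := by
  funext t f
  unfold pvStepA pvStepB
  by_cases h : ((List.lookup "display_path" f).getD "") = ""
  · simp [h]
  · simp only [h, if_false]
    cases hs : PySem.Str.split? ((List.lookup "display_path" f).getD "") "/" with
    | none => rfl
    | some parts =>
      cases parts with
      | nil => rfl
      | cons p r =>
        cases r with
        | nil => rfl
        | cons q r' => exact pvInsertB_eq_insertA _ _ _ (by simp)

-- the stack machine processes the file tasks of a node into exactly A's file lines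
lemma pvRun_fileTasks (l : List String) (pfx : String) (X : List PvTask) :
    pvRunB (pvFileTasksB l pfx ++ X) = pvFileLinesA l pfx ++ pvRunB X := by
  induction l generalizing pfx with
  | nil => simp [pvFileTasksB, pvFileLinesA]
  | cons f t ih =>
    cases t with
    | nil => simp [pvFileTasksB, pvFileLinesA, pvRunB]
    | cons g r => simp [pvFileTasksB, pvFileLinesA, pvRunB, ih]

-- the stack machine processes one node's dir tasks into A's dir loop, given the induction
-- hypothesis for strictly smaller nodes
lemma pvRun_dirTasks (k : Nat)
    (ih : ∀ (fs : List String) (d : PvDirs), 1 + fs.length + pvDsize d ≤ k →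
        ∀ (pfx : String) (X : List PvTask),
          pvRunB (pvExpandB fs d pfx ++ X) = pvAddTreeA fs d pfx ++ pvRunB X) :
    ∀ (items : List (String × (List String × PvDirs))), pvItemsSize items ≤ k →
      ∀ (sfs : List String) (pfx : String) (X : List PvTask),
        pvRunB (pvDirTasksB items sfs.isEmpty pfx ++ X) = pvDirLoopA items sfs pfx ++ pvRunB X := by
  intro items
  induction items with
  | nil => intro _ sfs pfx X; simp [pvDirTasksB, pvDirLoopA]
  | cons x rest ihr =>
    intro hk sfs pfx X
    obtain ⟨n, c⟩ := x
    have hsz : pvItemsSize ((n, c) :: rest) = 2 + c.1.length + pvDsize c.2 + pvItemsSize rest := by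
      simp [pvItemsSize]; try omega
    have hcons : pvDirLoopA ((n, c) :: rest) sfs pfx =
        (pfx ++ (if rest.isEmpty && sfs.isEmpty then "└── " else "├── ") ++ n ++ "/") ::
          (pvAddTreeA c.1 c.2 (pfx ++ (if rest.isEmpty && sfs.isEmpty then "    " else "│   "))
            ++ pvDirLoopA rest sfs pfx) := by
      rw [pvDirLoopA.eq_def]
    simp only [pvDirTasksB]
    rw [List.cons_append, List.cons_append, pvRunB, pvRunB, ← List.append_assoc,
        List.append_assoc (pvExpandB _ _ _)]
    rw [ih c.1 c.2 (by omega) _ _, ihr (by omega) sfs pfx X, hcons]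
    simp

-- main render equivalence: expanding a node on the stack emits exactly A's recursive lines
lemma pvRun_expand (k : Nat) :
    ∀ (fs : List String) (d : PvDirs), 1 + fs.length + pvDsize d ≤ k →
      ∀ (pfx : String) (X : List PvTask),
        pvRunB (pvExpandB fs d pfx ++ X) = pvAddTreeA fs d pfx ++ pvRunB X := by
  induction k with
  | zero => intro fs d h; omega
  | succ k ihk =>
    intro fs d h pfx X
    have hd := pvDsize_eq_itemsSize d
    rw [pvAddTreeA.eq_def]
    unfold pvExpandB
    rw [List.append_assoc]
    rw [pvRun_dirTasks k ihk _ (by rw [pvItemsSize_sorted]; omega) _ pfx _]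
    rw [pvRun_fileTasks]
    simp

-- ===== VERDICT (by name: the statement is the Claim_ definition above) =====
theorem generate_project_tree_py_spec : Claim_equal_generate_project_tree_py := by
  unfold Claim_equal_generate_project_tree_py
  intro files project_name _
  unfold Spec_generate_project_tree_py
  unfold generate_project_tree_py generate_project_tree_py_alt
  rw [pvStepB_eq_stepA]
  have h0 : ∀ (fs : List String) (d : PvDirs), pvRunB [PvTask.node fs d ""] = pvAddTreeA fs d "" := by
    intro fs d
    rw [show ([PvTask.node fs d ""] : List PvTask) = PvTask.node fs d "" :: [] from rfl, pvRunB,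
        pvRun_expand (1 + fs.length + pvDsize d) fs d (le_refl _)]
    simp [pvRunB]
  rw [h0]
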